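-- pv_equiv track=rewrite | github.com/JohnMCollins/python-astro-library | miscutils.py | hidden_split
-- ===== SOURCE A (Python) =====
-- def hidden_split(path):
--     """Split path into dirname and basename but take leading '.'s off basename
--     and append to dirname"""
--
--     try:
--         slp = path.rindex('/') + 1
--         dirname = path[:slp]
--         basename = path[slp:]
--     except ValueError:
--         dirname = ""
--         basename = path
--
--     # Now deal with leading s's in basename so we handle
--     # .foo.bar correctly
--
--     try:
--         while basename[0] == '.':
--             dirname += '.'
--             basename = basename[1:]
--     except IndexError:
--         pass
--     return  (dirname, basename)
-- ===== SOURCE B (Python) =====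
-- def hidden_split(path):
--     """Split path into dirname and basename, moving leading '.'s of the
--     basename onto the dirname, without try/except or a character loop."""
--     cut = path.rfind('/') + 1
--     tail = path[cut:]
--     base = tail.lstrip('.')
--     return (path[:cut] + '.' * (len(tail) - len(base)), base)
-- ===== Notes on version B (the rewrite author's own statement) =====
-- stated objective: simpler
-- what changed: Replaces rindex with try/except and the per-character while loop by a single rfind cut (its -1 sentinel plus 1 gives the right split uniformly) and a dot-strip whose length difference counts the moved dots.
import Mathlib
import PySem

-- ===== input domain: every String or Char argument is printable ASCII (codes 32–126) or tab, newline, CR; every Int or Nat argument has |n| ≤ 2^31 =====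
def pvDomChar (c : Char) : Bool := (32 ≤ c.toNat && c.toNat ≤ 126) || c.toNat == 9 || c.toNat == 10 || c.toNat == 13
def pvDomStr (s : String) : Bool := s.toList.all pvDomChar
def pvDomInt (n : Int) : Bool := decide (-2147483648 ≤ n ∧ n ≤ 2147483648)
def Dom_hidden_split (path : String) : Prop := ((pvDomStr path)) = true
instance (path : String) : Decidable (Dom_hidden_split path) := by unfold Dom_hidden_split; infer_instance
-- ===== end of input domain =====

-- B replaces rindex+try/except and the per-character while loop with rfind and
-- lstrip('.') plus a length difference: simpler, same cost; return value only.

-- ===== PORT A =====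
-- the 'while basename[0] == '.':' loop (IndexError on empty basename ends it)
def hiddenSplitLoop (dirname : List Char) : List Char → List Char × List Char
  | [] => (dirname, [])
  | c :: rest =>
    if c = '.' then hiddenSplitLoop (dirname ++ ['.']) rest
    else (dirname, c :: rest)

def hidden_split (path : String) : String × String :=
  let cs := path.toList
  -- path.rindex('/') raises ValueError exactly where rfind returns -1;
  -- the except branch sets dirname = "", basename = path
  let i := PySem.Chars.rfind cs ['/']
  let (dirname, basename) :=
    if i = -1 then (([] : List Char), cs)
    else (PySem.List.slice cs none (some (i + 1)), PySem.List.slice cs (some (i + 1)) none)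
  let (d, b) := hiddenSplitLoop dirname basename
  (String.ofList d, String.ofList b)

-- ===== PORT B =====
def hidden_split_alt (path : String) : String × String :=
  let cs := path.toList
  let cut := PySem.Chars.rfind cs ['/'] + 1
  let tail := PySem.List.slice cs (some cut) none
  -- tail.lstrip('.') : dropWhile is exact for a single strip character
  let base := tail.dropWhile (· == '.')
  (String.ofList (PySem.List.slice cs none (some cut) ++ List.replicate (tail.length - base.length) '.'),
   String.ofList base)

-- ===== PRECONDITION & SPEC =====
def Spec_hidden_split (path : String) (out : String × String) : Prop := out = hidden_split_alt path
instance (path : String) (out : String × String) : Decidable (Spec_hidden_split path out) := by unfold Spec_hidden_split; infer_instance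

-- ===== CLAIM (what is proved, stated in full; the proofs are below) =====
def Claim_equal_hidden_split : Prop := ∀ (path : String), Dom_hidden_split path → Spec_hidden_split path (hidden_split path)

-- ===== LEMMAS AND PROOFS =====

theorem rfind_go_ge (s sub : List Char) (n : Nat) : -1 ≤ PySem.Chars.rfind.go s sub n := by
  induction n with
  | zero => simp [PySem.Chars.rfind.go]; split <;> omega
  | succ j ih =>
    simp only [PySem.Chars.rfind.go]
    split
    · omega
    · exact ih

theorem rfind_ge (s sub : List Char) : -1 ≤ PySem.Chars.rfind s sub :=
  rfind_go_ge s sub s.length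

theorem hiddenSplitLoop_eq (d b : List Char) :
    hiddenSplitLoop d b =
      (d ++ List.replicate (b.length - (b.dropWhile (· == '.')).length) '.',
       b.dropWhile (· == '.')) := by
  induction b generalizing d with
  | nil => simp [hiddenSplitLoop]
  | cons c rest ih =>
    by_cases hc : c = '.'
    · subst hc
      have hlen : (rest.dropWhile (· == '.')).length ≤ rest.length :=
        List.Sublist.length_le (List.dropWhile_sublist _)
      simp [hiddenSplitLoop, ih]
      rw [show rest.length + 1 - (rest.dropWhile (· == '.')).length =
            (rest.length - (rest.dropWhile (· == '.')).length) + 1 by omega]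
      simp [List.replicate_succ]
    · simp [hiddenSplitLoop, hc]

-- ===== VERDICT (by name: the statement is the Claim_ definition above) =====
theorem hidden_split_spec : Claim_equal_hidden_split := by
  intro path _
  unfold Spec_hidden_split hidden_split hidden_split_alt
  set cs := path.toList with hcs
  have hge := rfind_ge cs ['/']
  by_cases h : PySem.Chars.rfind cs ['/'] = -1
  · simp only [h]
    have h0 : (-1 : Int) + 1 = 0 := by norm_num
    rw [h0]
    have ht : PySem.List.slice cs none (some (0:Int)) = cs.take (0:Int).toNat :=
      PySem.List.slice_to cs le_rfl
    have hf : PySem.List.slice cs (some (0:Int)) none = cs.drop (0:Int).toNat :=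
      PySem.List.slice_from cs le_rfl
    simp only [ht, hf, Int.toNat_zero, List.take_zero, List.drop_zero]
    rw [hiddenSplitLoop_eq]
    simp
  · simp only [if_neg h]
    rw [hiddenSplitLoop_eq]
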